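-- pv_equiv track=rewrite | github.com/hamzaenaime/rsa_python | encrypt.py | crypter
-- ===== SOURCE A (Python) =====
-- def crypter(code_ascii, N, E):
--     n=int(N)
--     e=int(E)
--     crypted = list()
--     message = str()
--     for i in range(0, len(code_ascii)):
--         cry = int((code_ascii[i] ** e) % n)
--         crypted.append(cry)
--         message += str(cry)
--     return crypted
-- ===== SOURCE B (Python) =====
-- def crypter(code_ascii, N, E):
--     n = int(N)
--     e = int(E)
--     crypted = []
--     for c in code_ascii:
--         result = 1 % n
--         base = c % n
--         exp = e
--         while exp > 0:
--             if exp & 1: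
--                 result = (result * base) % n
--             base = (base * base) % n
--             exp >>= 1
--         crypted.append(result)
--     return crypted
-- ===== Notes on version B (the rewrite author's own statement) =====
-- stated objective: faster
-- what changed: Replaces the per-element full power (c ** e) % n with binary modular exponentiation (square-and-multiply keeping every intermediate reduced mod n) and drops the unused message string.
-- outside the precondition, e.g. on crypter([2], 5, -1): A returns [0], B returns [1]; on crypter([2], 0, 3): A raises ZeroDivisionError, B raises ZeroDivisionError
import Mathlib
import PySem

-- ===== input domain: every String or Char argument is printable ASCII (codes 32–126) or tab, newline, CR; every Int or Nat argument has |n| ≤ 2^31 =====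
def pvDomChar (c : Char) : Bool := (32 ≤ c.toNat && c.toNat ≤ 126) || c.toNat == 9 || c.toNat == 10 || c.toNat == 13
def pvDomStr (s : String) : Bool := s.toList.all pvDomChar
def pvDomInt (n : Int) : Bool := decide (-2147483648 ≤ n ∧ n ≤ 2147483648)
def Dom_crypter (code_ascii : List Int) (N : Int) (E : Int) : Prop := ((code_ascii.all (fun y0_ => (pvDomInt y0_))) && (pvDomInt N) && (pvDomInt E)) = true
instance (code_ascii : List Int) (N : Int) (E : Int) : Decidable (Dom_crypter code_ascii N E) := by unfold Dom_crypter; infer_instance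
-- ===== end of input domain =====

-- B replaces the per-element full power (c ** e) % n by binary modular exponentiation
-- (square-and-multiply with a running reduced result); objective: faster.

-- ===== PORT A =====
-- A: loop i over range(0, len), cry = (code_ascii[i] ** e) % n, append, and build the unused string message.
def crypter (code_ascii : List Int) (N : Int) (E : Int) : List Int :=
  let n := N
  let e := E
  let st :=
    (PySem.List.pyRange 0 (PySem.List.len code_ascii)).foldl
      (fun (st : List Int × List Char) i =>
        let cry := PySem.Int.mod ((PySem.List.pyGetD code_ascii i 0) ^ e.toNat) n
        (st.1 ++ [cry], st.2 ++ PySem.Int.toChars cry))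
      ([], [])
  st.1

-- ===== PORT B =====
-- B's inner while loop: exp runs over the Nat e.toNat (= e under Pre_, where 0 ≤ E);
-- exp & 1 and exp >>= 1 are Nat's &&& and >>> 1.
def pvModPow (base : Int) (result : Int) (exp : Nat) (n : Int) : Int :=
  if exp > 0 then
    let result' := if exp &&& 1 = 1 then PySem.Int.mod (result * base) n else result
    pvModPow (PySem.Int.mod (base * base) n) result' (exp >>> 1) n
  else result
termination_by exp
decreasing_by simp [Nat.shiftRight_eq_div_pow]; omega

def crypter_alt (code_ascii : List Int) (N : Int) (E : Int) : List Int :=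
  let n := N
  let e := E
  code_ascii.foldl
    (fun (crypted : List Int) c =>
      crypted ++ [pvModPow (PySem.Int.mod c n) (PySem.Int.mod 1 n) e.toNat n])
    []

-- ===== PRECONDITION & SPEC =====
-- Pre_ excludes N = 0, where A raises ZeroDivisionError (and B does too), and negative E,
-- where A's ** produces a float intermediate (int((c**e) % n) truncates a float) while B's
-- bit loop never runs — a value outside the integer semantics ported here.
def Pre_crypter (code_ascii : List Int) (N : Int) (E : Int) : Prop := N ≠ 0 ∧ 0 ≤ E
instance (code_ascii : List Int) (N : Int) (E : Int) : Decidable (Pre_crypter code_ascii N E) := by unfold Pre_crypter; infer_instance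
def pvWitness_crypter : List Int × Int × Int := ([72, 101, 33], 77, 7)
def Spec_crypter (code_ascii : List Int) (N : Int) (E : Int) (out : List Int) : Prop := out = crypter_alt code_ascii N E
instance (code_ascii : List Int) (N : Int) (E : Int) (out : List Int) : Decidable (Spec_crypter code_ascii N E out) := by unfold Spec_crypter; infer_instance

-- ===== CLAIM (what is proved, stated in full; the proofs are below) =====
def Claim_equal_crypter : Prop := ∀ (code_ascii : List Int) (N : Int) (E : Int), Dom_crypter code_ascii N E → Pre_crypter code_ascii N E → Spec_crypter code_ascii N E (crypter code_ascii N E)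

-- ===== LEMMAS AND PROOFS =====

-- Python's % is congruence mod n: n divides (a % n) - a.
lemma pvMod_sub_self_dvd (a n : Int) : n ∣ (PySem.Int.mod a n - a) := by
  refine ⟨-(PySem.Int.floordiv a n), ?_⟩
  have h := PySem.Int.floordiv_mul_add_mod a n
  ring_nf
  linarith

lemma pvMod_congr (n : Int) (hn : n ≠ 0) {a b : Int} (h : n ∣ (a - b)) :
    PySem.Int.mod a n = PySem.Int.mod b n := by
  rcases h with ⟨k, hk⟩
  rcases lt_or_gt_of_ne hn with hneg | hpos
  · have ha := PySem.Int.mod_neg_neg (-a) (-n)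
    have hb := PySem.Int.mod_neg_neg (-b) (-n)
    simp only [neg_neg] at ha hb
    rw [ha, hb]
    congr 1
    rw [PySem.Int.mod_eq_emod_of_pos (by omega), PySem.Int.mod_eq_emod_of_pos (by omega)]
    exact Int.modEq_iff_dvd.mpr ⟨-k, by linarith⟩
  · rw [PySem.Int.mod_eq_emod_of_pos hpos, PySem.Int.mod_eq_emod_of_pos hpos]
    exact Int.modEq_iff_dvd.mpr ⟨-k, by linarith⟩

lemma pvMod_mul_mod (n : Int) (hn : n ≠ 0) (a b : Int) :
    PySem.Int.mod (PySem.Int.mod a n * PySem.Int.mod b n) n = PySem.Int.mod (a * b) n := by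
  apply pvMod_congr n hn
  have ha := pvMod_sub_self_dvd a n
  have hb := pvMod_sub_self_dvd b n
  have hsplit : PySem.Int.mod a n * PySem.Int.mod b n - a * b
      = PySem.Int.mod a n * (PySem.Int.mod b n - b) + b * (PySem.Int.mod a n - a) := by ring
  rw [hsplit]
  exact dvd_add (Dvd.dvd.mul_left hb _) (Dvd.dvd.mul_left ha _)

-- Invariant of the square-and-multiply loop.
lemma pvModPow_eq (n : Int) (hn : n ≠ 0) :
    ∀ (exp : Nat) (b r : Int),
      pvModPow (PySem.Int.mod b n) (PySem.Int.mod r n) exp n = PySem.Int.mod (r * b ^ exp) n := by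
  intro exp
  induction exp using Nat.strong_induction_on with
  | _ exp ih =>
    intro b r
    rw [pvModPow]
    by_cases hz : exp > 0
    · simp only [hz, if_true]
      have hdiv : exp >>> 1 = exp / 2 := by
        simp [Nat.shiftRight_eq_div_pow]
      have hlt : exp / 2 < exp := by omega
      have hbb : PySem.Int.mod (PySem.Int.mod b n * PySem.Int.mod b n) n
          = PySem.Int.mod (b * b) n := pvMod_mul_mod n hn b b
      rw [Nat.and_one_is_mod]
      by_cases hodd : exp % 2 = 1
      · simp only [hodd, if_true]
        rw [pvMod_mul_mod n hn r b, hbb, hdiv, ih (exp / 2) hlt (b * b) (r * b)]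
        congr 1
        have hb2 : b * (b * b) ^ (exp / 2) = b ^ exp := by
          conv_rhs => rw [show exp = 2 * (exp / 2) + 1 from by omega]
          rw [pow_succ, pow_mul, pow_two]
          ring
        rw [mul_assoc, hb2]
      · simp only [hodd, if_false]
        rw [hbb, hdiv, ih (exp / 2) hlt (b * b) r]
        congr 1
        have hb2 : (b * b) ^ (exp / 2) = b ^ exp := by
          conv_rhs => rw [show exp = 2 * (exp / 2) from by omega]
          rw [pow_mul, pow_two]
        rw [hb2]
    · simp only [hz, if_false]
      have hz0 : exp = 0 := by omega
      subst hz0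
      simp

-- A's pair-state append loop computes (acc ++ map, …); only the first component is returned.
lemma pvFoldl_pair_fst (f : Int → Int) (g : Int → List Char) :
    ∀ (l : List Int) (acc : List Int) (msg : List Char),
      (l.foldl (fun (st : List Int × List Char) c => (st.1 ++ [f c], st.2 ++ g c)) (acc, msg)).1
        = acc ++ l.map f := by
  intro l
  induction l with
  | nil => simp
  | cons c l ih => intro acc msg; simp [List.foldl_cons, ih]

-- B's append loop is map as well.
lemma pvFoldl_append_map (f : Int → Int) :
    ∀ (l : List Int) (acc : List Int),
      l.foldl (fun (crypted : List Int) c => crypted ++ [f c]) acc = acc ++ l.map f := by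
  intro l
  induction l with
  | nil => simp
  | cons c l ih => intro acc; simp [List.foldl_cons, ih]

lemma crypter_eq_map (code_ascii : List Int) (N E : Int) :
    crypter code_ascii N E = code_ascii.map (fun c => PySem.Int.mod (c ^ E.toNat) N) := by
  have h : crypter code_ascii N E
      = ((PySem.List.pyRange 0 (PySem.List.len code_ascii)).foldl
          (fun (st : List Int × List Char) i =>
            (st.1 ++ [PySem.Int.mod ((PySem.List.pyGetD code_ascii i 0) ^ E.toNat) N],
             st.2 ++ PySem.Int.toChars (PySem.Int.mod ((PySem.List.pyGetD code_ascii i 0) ^ E.toNat) N)))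
          ([], [])).1 := rfl
  rw [h, pvFoldl_pair_fst
        (fun i => PySem.Int.mod ((PySem.List.pyGetD code_ascii i 0) ^ E.toNat) N)
        (fun i => PySem.Int.toChars (PySem.Int.mod ((PySem.List.pyGetD code_ascii i 0) ^ E.toNat) N))]
  conv_rhs => rw [← PySem.List.map_pyGetD_pyRange_zero code_ascii (0 : Int), List.map_map]
  simp [Function.comp]

lemma crypter_alt_eq_map (code_ascii : List Int) (N E : Int) (hN : N ≠ 0) :
    crypter_alt code_ascii N E = code_ascii.map (fun c => PySem.Int.mod (c ^ E.toNat) N) := by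
  unfold crypter_alt
  rw [pvFoldl_append_map]
  simp only [List.nil_append]
  apply List.map_congr_left
  intro c _
  rw [pvModPow_eq N hN E.toNat c 1, one_mul]

-- ===== VERDICT (by name: the statement is the Claim_ definition above) =====
theorem crypter_spec : Claim_equal_crypter := by
  intro code_ascii N E _ hPre
  unfold Spec_crypter
  rw [crypter_eq_map, crypter_alt_eq_map code_ascii N E hPre.1]
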